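-- pv_equiv track=rewrite | github.com/Yuliang795/test | csplib_verify_scripts.py | check_block_consts
-- ===== SOURCE A (Python) =====
-- def check_block_consts(rules, sequence):
--     """ Check if a given sequence satisfies the block constraints in rules """
--     blocks = []
--     current_block = 0
--     for cell in sequence:
--         if cell == 1:
--             current_block += 1
--         elif current_block > 0:
--             blocks.append(current_block)
--             current_block = 0
--     if current_block > 0:
--         blocks.append(current_block)
--
--     # Remove leading zeros in rules (optional zeros can be ignored)
--     expected_blocks = [rule for rule in rules if rule > 0]
--
--     return blocks == expected_blocks
-- ===== SOURCE B (Python) =====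
-- def check_block_consts(rules, sequence):
--     """ Check if a given sequence satisfies the block constraints in rules """
--     i = 0
--     n = len(sequence)
--     for rule in rules:
--         if rule <= 0:
--             continue
--         while i < n and sequence[i] != 1:
--             i += 1
--         if i >= n:
--             return False
--         run = 0
--         while i < n and sequence[i] == 1:
--             run += 1
--             i += 1
--         if run != rule:
--             return False
--     while i < n:
--         if sequence[i] == 1:
--             return False
--         i += 1
--     return True
-- ===== Notes on version B (the rewrite author's own statement) =====
-- stated objective: alternative
-- what changed: Instead of materializing the list of run-lengths and comparing it to the filtered rules, B walks the sequence with a cursor, consuming one positive rule per run of ones, failing early on the first mismatch and finally checking that no further ones remain.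
import Mathlib
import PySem

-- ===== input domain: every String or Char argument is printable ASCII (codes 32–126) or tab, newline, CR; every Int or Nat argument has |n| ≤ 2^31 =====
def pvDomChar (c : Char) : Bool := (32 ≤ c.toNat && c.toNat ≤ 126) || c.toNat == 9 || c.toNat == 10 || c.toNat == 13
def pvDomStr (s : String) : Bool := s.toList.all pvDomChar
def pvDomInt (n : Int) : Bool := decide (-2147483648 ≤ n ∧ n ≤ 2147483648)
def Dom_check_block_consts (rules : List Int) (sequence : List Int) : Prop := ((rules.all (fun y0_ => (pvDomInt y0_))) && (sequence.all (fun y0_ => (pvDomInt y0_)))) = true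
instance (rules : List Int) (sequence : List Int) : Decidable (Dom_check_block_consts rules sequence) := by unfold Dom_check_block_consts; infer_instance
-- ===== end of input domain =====

-- B verifies the rules against the sequence with a moving cursor (one positive rule per run
-- of ones, early exit on the first mismatch) instead of building the run-length list and
-- comparing it to the filtered rules; alternative decomposition, same cost.

-- ===== PORT A =====
-- the loop state is (blocks, current_block); the trailing flush follows the loop
def check_block_consts (rules : List Int) (sequence : List Int) : Bool :=
  let st := sequence.foldl
    (fun (p : List Int × Int) cell =>
      if cell = 1 then (p.1, p.2 + 1)
      else if p.2 > 0 then (p.1 ++ [p.2], 0)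
      else p) ([], 0)
  let blocks := if st.2 > 0 then st.1 ++ [st.2] else st.1
  let expected_blocks := rules.filter (fun rule => rule > 0)
  blocks == expected_blocks

-- ===== PORT B =====
-- port of Source B's cursor walk: the cursor i over the list becomes the remaining suffix;
-- each 'while' over the suffix becomes a dropWhile (skip) / takeWhile-length (count run),
-- exactly the cells the Python while loops consume; the final while is the trailing .all
def matchRules (rules : List Int) (seq : List Int) : Bool :=
  match rules with
  | [] => seq.all (fun c => !(c == 1))            -- final while: fail on any remaining 1
  | r :: rs =>
    if r ≤ 0 then matchRules rs seq               -- 'continue' on non-positive rule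
    else
      let seq1 := seq.dropWhile (fun c => !(c == 1))   -- while … != 1: i += 1
      if seq1.isEmpty then false                  -- if i >= n: return False
      else
        let run := (seq1.takeWhile (fun c => c == 1)).length  -- while … == 1: run += 1
        if (run : Int) ≠ r then false
        else matchRules rs (seq1.dropWhile (fun c => c == 1))

def check_block_consts_alt (rules : List Int) (sequence : List Int) : Bool :=
  matchRules rules sequence

-- ===== PRECONDITION & SPEC =====
def Spec_check_block_consts (rules : List Int) (sequence : List Int) (out : Bool) : Prop := out = check_block_consts_alt rules sequence
instance (rules : List Int) (sequence : List Int) (out : Bool) : Decidable (Spec_check_block_consts rules sequence out) := by unfold Spec_check_block_consts; infer_instance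

-- ===== CLAIM (what is proved, stated in full; the proofs are below) =====
def Claim_equal_check_block_consts : Prop := ∀ (rules : List Int) (sequence : List Int), Dom_check_block_consts rules sequence → Spec_check_block_consts rules sequence (check_block_consts rules sequence)

-- ===== LEMMAS AND PROOFS =====

-- runs of ones with a pending run of length cur already accumulated (characterizes A's fold)
def runsAux (cur : Int) (xs : List Int) : List Int :=
  match xs with
  | [] => if cur > 0 then [cur] else []
  | c :: rest =>
    if c = 1 then runsAux (cur + 1) rest
    else if cur > 0 then cur :: runsAux 0 rest
    else runsAux 0 rest

theorem runsAux_pos (xs : List Int) : ∀ cur : Int, 0 < cur →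
    runsAux cur xs
      = (cur + (xs.takeWhile (fun x => x = 1)).length)
          :: runsAux 0 (xs.dropWhile (fun x => x = 1)) := by
  induction xs with
  | nil => intro cur h; simp [runsAux, h]
  | cons c rest ih =>
    intro cur h
    by_cases hc : c = 1
    · rw [runsAux, if_pos hc, ih (cur + 1) (by omega),
        List.takeWhile_cons, List.dropWhile_cons]
      simp only [hc, decide_true, if_true, List.length_cons]
      congr 1
      push_cast; omega
    · rw [runsAux, if_neg hc, if_pos h, List.takeWhile_cons, List.dropWhile_cons]
      simp only [hc, decide_false, Bool.false_eq_true, if_false]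
      conv_rhs => rw [runsAux, if_neg hc, if_neg (by omega : ¬ (0:Int) > 0)]
      simp

theorem runsAux_zero_dropWhile (xs : List Int) :
    runsAux 0 xs = runsAux 0 (xs.dropWhile (fun x => x ≠ 1)) := by
  induction xs with
  | nil => simp
  | cons c rest ih =>
    by_cases hc : c = 1
    · simp [hc]
    · rw [runsAux, if_neg hc, if_neg (by omega : ¬ (0:Int) > 0),
        List.dropWhile_cons]
      simpa [hc] using ih

theorem fold_finalize (xs : List Int) : ∀ (blocks : List Int) (cur : Int), 0 ≤ cur →
    (let st := xs.foldl
        (fun (p : List Int × Int) cell =>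
          if cell = 1 then (p.1, p.2 + 1)
          else if p.2 > 0 then (p.1 ++ [p.2], 0)
          else p) (blocks, cur)
      if st.2 > 0 then st.1 ++ [st.2] else st.1)
      = blocks ++ runsAux cur xs := by
  induction xs with
  | nil =>
    intro blocks cur _
    simp only [List.foldl_nil, runsAux]
    split_ifs <;> simp
  | cons c rest ih =>
    intro blocks cur hcur
    by_cases hc : c = 1
    · simpa [List.foldl_cons, hc, runsAux] using ih blocks (cur + 1) (by omega)
    · by_cases hp : cur > 0
      · rw [List.foldl_cons]
        simp only [hc, if_false, hp, if_true]
        rw [ih (blocks ++ [cur]) 0 le_rfl, runsAux, if_neg hc, if_pos hp,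
          List.append_assoc]
        rfl
      · have hz : cur = 0 := by omega
        rw [List.foldl_cons]
        simp only [hc, if_false, hp, if_false]
        rw [ih blocks cur hcur, hz, runsAux, if_neg hc,
          if_neg (by omega : ¬ (0:Int) > 0)]

theorem runsAux_zero_nil_iff (xs : List Int) :
    (runsAux 0 xs = []) ↔ xs.all (fun c => !(c == 1)) := by
  induction xs with
  | nil => simp [runsAux]
  | cons c rest ih =>
    by_cases hc : c = 1
    · rw [runsAux, if_pos hc, (by norm_num : (0:Int)+1 = 1), runsAux_pos rest 1 (by omega)]
      simp [hc]
    · rw [runsAux, if_neg hc, if_neg (by omega : ¬ (0:Int) > 0)]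
      simp [hc, ih]

-- the head of a dropWhile result falsifies the predicate
theorem dropWhile_head_false {α : Type} {p : α → Bool} {l : List α} {c : α} {rest : List α}
    (h : l.dropWhile p = c :: rest) : p c = false := by
  induction l with
  | nil => simp at h
  | cons a t ih =>
    rw [List.dropWhile_cons] at h
    by_cases hp : p a
    · rw [if_pos hp] at h; exact ih h
    · rw [if_neg hp] at h
      cases h
      simpa using hp

theorem predNe_eq : (fun c : Int => !(c == 1)) = (fun x : Int => decide (x ≠ 1)) := by
  funext x; by_cases h : x = 1 <;> simp [h]

theorem predEq_eq : (fun c : Int => (c == 1)) = (fun x : Int => decide (x = 1)) := by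
  funext x; by_cases h : x = 1 <;> simp [h]

-- the key bridge: B's verifier decides equality of A's run list with the filtered rules
theorem matchRules_eq (rules : List Int) : ∀ seq : List Int,
    matchRules rules seq = (runsAux 0 seq == rules.filter (fun rule => rule > 0)) := by
  induction rules with
  | nil =>
    intro seq
    rw [matchRules]
    simp only [List.filter_nil]
    have h2 := runsAux_zero_nil_iff seq
    cases hb : seq.all (fun c => !(c == 1)) with
    | false =>
      have hne : runsAux 0 seq ≠ [] := fun h => by simp [h2.mp h] at hb
      simp [hne]
    | true =>
      simp [h2.mpr hb]
  | cons r rs ih =>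
    intro seq
    by_cases hr : r ≤ 0
    · rw [matchRules, if_pos hr, ih]
      have : ¬ (r > 0) := by omega
      simp [this]
    · rw [matchRules, if_neg hr]
      have hrpos : r > 0 := by omega
      simp only [List.filter_cons, hrpos, decide_true, if_true]
      have hdrop : runsAux 0 seq = runsAux 0 (seq.dropWhile (fun c => !(c == 1))) := by
        rw [runsAux_zero_dropWhile seq, predNe_eq]
      by_cases hnil : (seq.dropWhile (fun c => !(c == 1))).isEmpty
      · rw [if_pos hnil]
        rw [List.isEmpty_iff] at hnil
        rw [hdrop, hnil]
        simp [runsAux]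
      · rw [if_neg hnil]
        rw [List.isEmpty_iff] at hnil
        obtain ⟨c, rest, hcr⟩ := List.exists_cons_of_ne_nil hnil
        have hc1 : c = 1 := by
          have := dropWhile_head_false hcr
          simpa using this
        have hruns : runsAux 0 (seq.dropWhile (fun c => !(c == 1)))
            = ((1 + (rest.takeWhile (fun x => x = 1)).length : Int)
                :: runsAux 0 (rest.dropWhile (fun x => x = 1))) := by
          rw [hcr, hc1, runsAux, if_pos rfl, (by norm_num : (0:Int)+1 = 1),
            runsAux_pos rest 1 (by omega)]
        have htake : (((seq.dropWhile (fun c => !(c == 1))).takeWhile (fun c => c == 1)).length : Int)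
            = 1 + (rest.takeWhile (fun x => x = 1)).length := by
          rw [hcr, List.takeWhile_cons]
          simp only [hc1, beq_self_eq_true, if_true, List.length_cons, predEq_eq]
          push_cast; omega
        have hdrop2 : (seq.dropWhile (fun c => !(c == 1))).dropWhile (fun c => c == 1)
            = rest.dropWhile (fun x : Int => x = 1) := by
          rw [hcr, List.dropWhile_cons]
          simp only [hc1, beq_self_eq_true, if_true, predEq_eq]
        by_cases hrun : (((seq.dropWhile (fun c => !(c == 1))).takeWhile (fun c => c == 1)).length : Int) ≠ r
        · rw [if_pos hrun]
          rw [hdrop, hruns]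
          rw [htake] at hrun
          simp [hrun]
        · rw [if_neg hrun]
          push Not at hrun
          rw [ih, hdrop, hruns, hdrop2]
          rw [htake] at hrun
          rw [hrun]
          by_cases h2 : runsAux 0 (rest.dropWhile (fun x : Int => x = 1))
              = rs.filter (fun rule => decide (rule > 0)) <;> simp [h2]

-- ===== VERDICT (by name: the statement is the Claim_ definition above) =====
theorem check_block_consts_spec : Claim_equal_check_block_consts := by
  intro rules sequence _
  unfold Spec_check_block_consts check_block_consts check_block_consts_alt
  have h := fold_finalize sequence [] 0 le_rfl
  simp only [List.nil_append] at h
  rw [matchRules_eq]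
  simp only [h]
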